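-- pv_equiv track=rewrite | github.com/tensorflow/autograph | reference_tests/loop_control_flow_test.py | break_in_inner_while
-- ===== SOURCE A (Python) =====
-- def break_in_inner_while(x, y):
--   s = 0
--   while x > 0:
--     x -= 1
--     while y > 0:
--       y -= 1
--       if ((x + y) % 2) == 0:
--         break
--       s += x + y
--   return s
-- ===== SOURCE B (Python) =====
-- def break_in_inner_while(x, y):
--   # Closed form. If x+y is even, every inner pass breaks immediately (t even),
--   # so nothing is added. If x+y is odd (and both positive), the first outer
--   # iteration adds x+y-2 and leaves an even sum, after which nothing is added.
--   if x > 0 and y > 0 and (x + y) % 2 != 0: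
--     return x + y - 2
--   return 0
-- ===== Notes on version B (the rewrite author's own statement) =====
-- stated objective: faster
-- what changed: Replaced the nested while loops by an O(1) closed form: the loop adds nothing when x+y is even, and adds exactly x+y-2 once when x+y is odd with both arguments positive.
import Mathlib
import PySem

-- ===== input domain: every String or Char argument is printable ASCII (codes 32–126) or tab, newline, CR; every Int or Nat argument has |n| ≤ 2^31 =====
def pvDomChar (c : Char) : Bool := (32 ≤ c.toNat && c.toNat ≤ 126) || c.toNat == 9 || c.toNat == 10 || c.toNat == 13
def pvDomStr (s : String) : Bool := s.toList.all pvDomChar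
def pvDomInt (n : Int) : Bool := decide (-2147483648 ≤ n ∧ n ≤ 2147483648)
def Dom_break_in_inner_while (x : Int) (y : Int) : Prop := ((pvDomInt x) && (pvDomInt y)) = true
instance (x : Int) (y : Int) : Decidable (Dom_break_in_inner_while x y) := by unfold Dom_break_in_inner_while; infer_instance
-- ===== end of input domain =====

-- B replaces A's nested loops by a closed form: 0 when x+y is even or an argument is nonpositive, else x+y-2.

-- ===== PORT A =====
-- inner 'while y > 0' of A; returns the updated (y, s)
def pvInnerA (x : Int) (y : Int) (s : Int) : Int × Int :=
  if _h : y > 0 then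
    let y' := y - 1
    if PySem.Int.mod (x + y') 2 = 0 then (y', s)
    else pvInnerA x y' (s + x + y')
  else (y, s)
termination_by y.toNat
decreasing_by omega

-- outer 'while x > 0' of A
def pvOuterA (x : Int) (y : Int) (s : Int) : Int :=
  if h : x > 0 then
    let x' := x - 1
    let p := pvInnerA x' y s
    pvOuterA x' p.1 p.2
  else s
termination_by x.toNat
decreasing_by omega

def break_in_inner_while (x : Int) (y : Int) : Int := pvOuterA x y 0

-- ===== PORT B =====
def break_in_inner_while_alt (x : Int) (y : Int) : Int :=
  if x > 0 ∧ y > 0 ∧ PySem.Int.mod (x + y) 2 ≠ 0 then x + y - 2 else 0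

-- ===== PRECONDITION & SPEC =====
def Spec_break_in_inner_while (x : Int) (y : Int) (out : Int) : Prop := out = break_in_inner_while_alt x y
instance (x : Int) (y : Int) (out : Int) : Decidable (Spec_break_in_inner_while x y out) := by unfold Spec_break_in_inner_while; infer_instance

-- ===== CLAIM (what is proved, stated in full; the proofs are below) =====
def Claim_equal_break_in_inner_while : Prop := ∀ (x : Int) (y : Int), Dom_break_in_inner_while x y → Spec_break_in_inner_while x y (break_in_inner_while x y)

-- ===== LEMMAS AND PROOFS =====

theorem pvMod2 (a : Int) : PySem.Int.mod a 2 = a % 2 :=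
  PySem.Int.mod_eq_emod_of_pos (by norm_num)

-- A's inner loop runs at most two steps: characterise its result in closed form.
theorem pvInnerA_char (x y s : Int) :
    pvInnerA x y s =
      if y ≤ 0 then (y, s)
      else if PySem.Int.mod (x + y - 1) 2 = 0 then (y - 1, s)
      else if y ≥ 2 then (y - 2, s + x + y - 1)
      else (0, s + x + y - 1) := by
  have harr : x + (y - 1) = x + y - 1 := by ring
  rw [pvInnerA]
  by_cases hy : y > 0
  · rw [dif_pos hy, if_neg (by omega : ¬ y ≤ 0)]
    by_cases hp : PySem.Int.mod (x + y - 1) 2 = 0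
    · rw [if_pos (by rw [harr]; exact hp), if_pos hp]
    · rw [if_neg (by rw [harr]; exact hp), pvInnerA, if_neg hp]
      by_cases hy2 : y ≥ 2
      · rw [dif_pos (by omega : y - 1 > 0), if_pos hy2]
        have he : PySem.Int.mod (x + (y - 1 - 1)) 2 = 0 := by
          rw [pvMod2] at hp ⊢
          omega
        rw [if_pos he]
        exact congrArg₂ Prod.mk (by omega) (by ring)
      · rw [dif_neg (by omega : ¬ y - 1 > 0), if_neg hy2]
        exact congrArg₂ Prod.mk (by omega) (by ring)
  · rw [dif_neg hy, if_pos (by omega : y ≤ 0)]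

-- the loop invariant: A's outer loop adds exactly the closed form to s
theorem pvOuterA_closed (n : Nat) (x y s : Int) (hx : x.toNat = n) :
    pvOuterA x y s = s + break_in_inner_while_alt x y := by
  induction n generalizing x y s with
  | zero =>
    rw [pvOuterA, dif_neg (by omega : ¬ x > 0), break_in_inner_while_alt,
        if_neg (by omega : ¬ (x > 0 ∧ y > 0 ∧ PySem.Int.mod (x + y) 2 ≠ 0))]
    ring
  | succ k ih =>
    rw [pvOuterA]
    by_cases hxp : x > 0
    · rw [dif_pos hxp]
      show pvOuterA (x - 1) (pvInnerA (x - 1) y s).1 (pvInnerA (x - 1) y s).2 =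
        s + break_in_inner_while_alt x y
      rw [pvInnerA_char]
      by_cases hy : y ≤ 0
      · rw [if_pos hy, ih (x - 1) y s (by omega), break_in_inner_while_alt,
            break_in_inner_while_alt,
            if_neg (by omega : ¬ (x - 1 > 0 ∧ y > 0 ∧ PySem.Int.mod (x - 1 + y) 2 ≠ 0)),
            if_neg (by omega : ¬ (x > 0 ∧ y > 0 ∧ PySem.Int.mod (x + y) 2 ≠ 0))]
      · rw [if_neg hy]
        by_cases hp : PySem.Int.mod (x - 1 + y - 1) 2 = 0
        · -- x + y even: nothing is ever added
          rw [if_pos hp, ih (x - 1) (y - 1) s (by omega), break_in_inner_while_alt,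
              break_in_inner_while_alt]
          rw [pvMod2] at hp
          rw [if_neg (by rw [pvMod2]; omega :
                ¬ (x - 1 > 0 ∧ y - 1 > 0 ∧ PySem.Int.mod (x - 1 + (y - 1)) 2 ≠ 0)),
              if_neg (by rw [pvMod2]; omega :
                ¬ (x > 0 ∧ y > 0 ∧ PySem.Int.mod (x + y) 2 ≠ 0))]
        · -- x + y odd: the first iteration adds x + y - 2, afterwards the sum is even
          rw [if_neg hp]
          rw [pvMod2] at hp
          by_cases hy2 : y ≥ 2
          · rw [if_pos hy2, ih (x - 1) (y - 2) _ (by omega), break_in_inner_while_alt,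
                break_in_inner_while_alt,
                if_neg (by rw [pvMod2]; omega :
                  ¬ (x - 1 > 0 ∧ y - 2 > 0 ∧ PySem.Int.mod (x - 1 + (y - 2)) 2 ≠ 0)),
                if_pos (by refine ⟨hxp, by omega, ?_⟩; rw [pvMod2]; omega)]
            ring
          · rw [if_neg hy2, ih (x - 1) 0 _ (by omega), break_in_inner_while_alt,
                break_in_inner_while_alt,
                if_neg (by omega : ¬ (x - 1 > 0 ∧ (0:Int) > 0 ∧ PySem.Int.mod (x - 1 + 0) 2 ≠ 0)),
                if_pos (by refine ⟨hxp, by omega, ?_⟩; rw [pvMod2]; omega)]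
            have h1 : y = 1 := by omega
            subst h1
            ring
    · rw [dif_neg hxp, break_in_inner_while_alt,
          if_neg (by omega : ¬ (x > 0 ∧ y > 0 ∧ PySem.Int.mod (x + y) 2 ≠ 0))]
      ring

-- ===== VERDICT (by name: the statement is the Claim_ definition above) =====
theorem break_in_inner_while_spec : Claim_equal_break_in_inner_while := by
  intro x y _
  unfold Spec_break_in_inner_while break_in_inner_while
  rw [pvOuterA_closed x.toNat x y 0 rfl]
  ring
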